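-- pv_equiv track=rewrite | github.com/maximiliann97/Homeworks-FFR120 | Homework4/PrisonerFunctions.py | years
-- ===== SOURCE A (Python) =====
-- def years(m, n, N, R, S, P):
--     T = 0
--     years_in_prison = 0
--
--     if m == 0:
--         player_A = [0]*N
--     else:
--         player_A = [1]*m + [0]*(N-m)
--
--     if n == 0:
--         player_B = [0]*N
--     else:
--         player_B = [1]*n + [0]*(N-n)
--
--     for i in range(N):
--         if player_A[i] == 1 and player_B[i] == 1:   # Both cooperates
--             years_in_prison = years_in_prison + R
--
--         if player_A[i] == 0 and player_B[i] == 1:   # A defects, B cooperates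
--             years_in_prison = years_in_prison + T
--             player_B = [1]*(i+1) + [0]*(N-i+1)
--
--         if player_A[i] == 1 and player_B[i] == 0:   # A cooperates, B defects
--             years_in_prison = years_in_prison + S
--             player_A = [1]*(i+1) + [0]*(N-i+1)
--
--         if player_A[i] == 0 and player_B[i] == 0:   # Both defects
--             years_in_prison = years_in_prison + P
--
--     return years_in_prison
-- ===== SOURCE B (Python) =====
-- def years(m, n, N, R, S, P):
--     # Closed form of the grim-trigger simulation (note A hard-codes T = 0):
--     # both cooperate for min(a, b) rounds earning R, then one mismatch round
--     # (S if B is the first defector, 0 if A is), then mutual defection (P).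
--     if N <= 0:
--         return 0
--     a = min(m, N) if m > 0 else 0
--     b = min(n, N) if n > 0 else 0
--     k = min(a, b)
--     if k == N:
--         return N * R
--     if a == b:
--         return k * R + (N - k) * P
--     return k * R + (S if a > b else 0) + (N - 1 - k) * P
-- ===== Notes on version B (the rewrite author's own statement) =====
-- stated objective: faster
-- what changed: Replaced the O(N) round-by-round simulation with list rebuilding by an O(1) closed form: min(a,b) cooperative rounds give R each, one mismatch round gives S (or the hard-coded T=0), and all remaining rounds give P.
import Mathlib
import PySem

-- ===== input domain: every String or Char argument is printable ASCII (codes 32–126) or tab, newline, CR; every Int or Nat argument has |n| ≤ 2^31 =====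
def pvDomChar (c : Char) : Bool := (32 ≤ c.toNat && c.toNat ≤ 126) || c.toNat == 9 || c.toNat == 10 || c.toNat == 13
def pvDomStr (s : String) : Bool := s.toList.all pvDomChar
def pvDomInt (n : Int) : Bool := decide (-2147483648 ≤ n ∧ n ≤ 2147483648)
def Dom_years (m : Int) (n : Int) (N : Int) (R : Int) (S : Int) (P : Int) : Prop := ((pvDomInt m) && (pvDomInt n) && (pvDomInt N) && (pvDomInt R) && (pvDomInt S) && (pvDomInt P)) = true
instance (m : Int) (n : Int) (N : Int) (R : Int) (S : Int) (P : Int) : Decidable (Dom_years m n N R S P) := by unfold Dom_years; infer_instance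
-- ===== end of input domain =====

-- B replaces A's O(N) round-by-round grim-trigger simulation by an O(1) closed form.

-- ===== PORT A =====
-- one iteration of A's loop body (the player lists are re-read after each in-place reassignment, as in the Python)
def yearsStep (N : Int) (R : Int) (S : Int) (P : Int) (st : Int × List Int × List Int) (i : Int) : Int × List Int × List Int :=
  let T : Int := 0
  let y := st.1
  let pA := st.2.1
  let pB := st.2.2
  let y := if PySem.List.pyGetD pA i 0 = 1 ∧ PySem.List.pyGetD pB i 0 = 1 then y + R else y
  let yB := if PySem.List.pyGetD pA i 0 = 0 ∧ PySem.List.pyGetD pB i 0 = 1 then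
      (y + T, List.replicate (i.toNat + 1) (1 : Int) ++ List.replicate (N - i + 1).toNat (0 : Int))
    else (y, pB)
  let y := yB.1
  let pB := yB.2
  let yA := if PySem.List.pyGetD pA i 0 = 1 ∧ PySem.List.pyGetD pB i 0 = 0 then
      (y + S, List.replicate (i.toNat + 1) (1 : Int) ++ List.replicate (N - i + 1).toNat (0 : Int))
    else (y, pA)
  let y := yA.1
  let pA := yA.2
  let y := if PySem.List.pyGetD pA i 0 = 0 ∧ PySem.List.pyGetD pB i 0 = 0 then y + P else y
  (y, pA, pB)

def years (m : Int) (n : Int) (N : Int) (R : Int) (S : Int) (P : Int) : Int :=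
  let playerA : List Int :=
    if m = 0 then List.replicate N.toNat (0 : Int)
    else List.replicate m.toNat (1 : Int) ++ List.replicate (N - m).toNat (0 : Int)
  let playerB : List Int :=
    if n = 0 then List.replicate N.toNat (0 : Int)
    else List.replicate n.toNat (1 : Int) ++ List.replicate (N - n).toNat (0 : Int)
  ((PySem.List.pyRange 0 N 1).foldl (yearsStep N R S P) (0, playerA, playerB)).1

-- ===== PORT B =====
def years_alt (m : Int) (n : Int) (N : Int) (R : Int) (S : Int) (P : Int) : Int :=
  if N ≤ 0 then 0
  else
    let a : Int := if m > 0 then min m N else 0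
    let b : Int := if n > 0 then min n N else 0
    let k : Int := min a b
    if k = N then N * R
    else if a = b then k * R + (N - k) * P
    else k * R + (if a > b then S else 0) + (N - 1 - k) * P

-- ===== PRECONDITION & SPEC =====
def Spec_years (m : Int) (n : Int) (N : Int) (R : Int) (S : Int) (P : Int) (out : Int) : Prop := out = years_alt m n N R S P
instance (m : Int) (n : Int) (N : Int) (R : Int) (S : Int) (P : Int) (out : Int) : Decidable (Spec_years m n N R S P out) := by unfold Spec_years; infer_instance

-- ===== CLAIM (what is proved, stated in full; the proofs are below) =====
def Claim_equal_years : Prop := ∀ (m : Int) (n : Int) (N : Int) (R : Int) (S : Int) (P : Int), Dom_years m n N R S P → Spec_years m n N R S P (years m n N R S P)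

-- ===== LEMMAS AND PROOFS =====

-- abstract state: a player list 'replicate t 1 ++ replicate s 0' is summarised by its 1-threshold t
def absStep (R : Int) (S : Int) (P : Int) (st : Int × Nat × Nat) (i : Int) : Int × Nat × Nat :=
  let y := st.1
  let ta := st.2.1
  let tb := st.2.2
  let y := if i < (ta : Int) ∧ i < (tb : Int) then y + R else y
  let tb := if ¬ i < (ta : Int) ∧ i < (tb : Int) then i.toNat + 1 else tb
  let yta := if i < (ta : Int) ∧ ¬ i < (tb : Int) then (y + S, i.toNat + 1) else (y, ta)
  let y := yta.1
  let ta := yta.2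
  let y := if ¬ i < (ta : Int) ∧ ¬ i < (tb : Int) then y + P else y
  (y, ta, tb)

lemma rep_pyGetD (t s : Nat) (i : Int) (hi : 0 ≤ i) :
    PySem.List.pyGetD (List.replicate t (1 : Int) ++ List.replicate s (0 : Int)) i 0
      = if i < (t : Int) then 1 else 0 := by
  obtain ⟨j, rfl⟩ : ∃ j : Nat, i = (j : Int) := ⟨i.toNat, (Int.toNat_of_nonneg hi).symm⟩
  rw [PySem.List.pyGetD_natCast]
  by_cases hj : j < t
  · rw [if_pos (by exact_mod_cast hj)]
    rw [List.getD_eq_getElem?_getD, List.getElem?_append_left (by simpa using hj)]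
    simp [hj]
  · rw [if_neg (by exact_mod_cast hj)]
    by_cases hjs : j < t + s
    · rw [List.getD_eq_getElem?_getD, List.getElem?_append_right (by simpa using hj)]
      rw [List.getElem?_replicate]
      simp only [List.length_replicate]
      rw [if_pos (by omega)]
      rfl
    · rw [List.getD_eq_getElem?_getD, List.getElem?_eq_none (by simp; omega)]
      rfl

lemma step_rep (N R S P : Int) (y : Int) (ta tb sa sb : Nat) (i : Int) (hi : 0 ≤ i) :
    ∃ sa' sb',
      yearsStep N R S P (y, List.replicate ta (1:Int) ++ List.replicate sa (0:Int),
                            List.replicate tb (1:Int) ++ List.replicate sb (0:Int)) i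
        = ((absStep R S P (y, ta, tb) i).1,
           List.replicate (absStep R S P (y, ta, tb) i).2.1 (1:Int) ++ List.replicate sa' (0:Int),
           List.replicate (absStep R S P (y, ta, tb) i).2.2 (1:Int) ++ List.replicate sb' (0:Int)) := by
  have hlt : i < ((i.toNat + 1 : Nat) : Int) := by omega
  by_cases hA : i < (ta : Int) <;> by_cases hB : i < (tb : Int)
  · exact ⟨sa, sb, by simp [yearsStep, absStep, rep_pyGetD _ _ _ hi, hA, hB]⟩
  · exact ⟨(N - i + 1).toNat, sb, by simp [yearsStep, absStep, rep_pyGetD _ _ _ hi, hA, hB, hlt]⟩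
  · exact ⟨sa, (N - i + 1).toNat, by simp [yearsStep, absStep, rep_pyGetD _ _ _ hi, hA, hB, hlt]⟩
  · exact ⟨sa, sb, by simp [yearsStep, absStep, rep_pyGetD _ _ _ hi, hA, hB]⟩

lemma bridge (N R S P : Int) :
    ∀ (l : List Int), (∀ i ∈ l, 0 ≤ i) → ∀ (y : Int) (ta tb sa sb : Nat),
    (l.foldl (yearsStep N R S P)
        (y, List.replicate ta (1:Int) ++ List.replicate sa (0:Int),
            List.replicate tb (1:Int) ++ List.replicate sb (0:Int))).1
      = (l.foldl (absStep R S P) (y, ta, tb)).1 := by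
  intro l
  induction l with
  | nil => intro _ y ta tb sa sb; rfl
  | cons i l ih =>
      intro hl y ta tb sa sb
      obtain ⟨sa', sb', hstep⟩ := step_rep N R S P y ta tb sa sb i (hl i (by simp))
      rw [List.foldl_cons, List.foldl_cons, hstep]
      have habs : absStep R S P (y, ta, tb) i
          = ((absStep R S P (y, ta, tb) i).1, (absStep R S P (y, ta, tb) i).2.1, (absStep R S P (y, ta, tb) i).2.2) := rfl
      rw [habs]
      exact ih (fun j hj => hl j (by simp [hj])) _ _ _ sa' sb'

-- closed form of the remaining loop, starting at round i with cooperation thresholds ta, tb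
def closedFrom (N R S P : Int) (i : Int) (ta tb : Nat) : Int :=
  if N ≤ i then 0
  else
    let k : Int := min (ta : Int) (tb : Int)
    if N ≤ k then (N - i) * R
    else
      let j : Int := max k i
      (j - i) * R + (if j < (tb : Int) then 0 else if j < (ta : Int) then S else P) + (N - 1 - j) * P

lemma cf_dead (N R S P : Int) (i : Int) (ta tb : Nat) (hta : (ta : Int) ≤ i) (htb : (tb : Int) ≤ i) :
    closedFrom N R S P i ta tb = if N ≤ i then 0 else (N - i) * P := by
  simp only [closedFrom]
  by_cases hNi : N ≤ i
  · simp [hNi]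
  · rw [if_neg hNi, if_neg hNi, if_neg (by omega : ¬ N ≤ min (ta:Int) (tb:Int)),
        max_eq_right (by omega : min (ta:Int) (tb:Int) ≤ i),
        if_neg (by omega : ¬ i < (tb:Int)), if_neg (by omega : ¬ i < (ta:Int))]
    ring

lemma cf_coop (N R S P : Int) (i : Int) (ta tb : Nat) (hiN : i < N)
    (hA : i < (ta : Int)) (hB : i < (tb : Int)) :
    closedFrom N R S P i ta tb = R + closedFrom N R S P (i+1) ta tb := by
  simp only [closedFrom]
  rw [if_neg (by omega : ¬ N ≤ i)]
  by_cases hNk : N ≤ min (ta : Int) (tb : Int)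
  · rw [if_pos hNk]
    by_cases hN1 : N ≤ i + 1
    · rw [if_pos hN1, show N - i = 1 by omega]; ring
    · rw [if_neg hN1, if_pos hNk]; ring
  · rw [if_neg hNk, max_eq_left (by omega : i ≤ min (ta:Int) (tb:Int)),
        if_neg (by omega : ¬ N ≤ i + 1), if_neg hNk,
        max_eq_left (by omega : i + 1 ≤ min (ta:Int) (tb:Int))]
    ring

lemma cf_mismatch (N R S P : Int) (i : Int) (ta tb : Nat) (hiN : i < N)
    (hk : min (ta : Int) (tb : Int) ≤ i) :
    closedFrom N R S P i ta tb
      = (if i < (tb : Int) then 0 else if i < (ta : Int) then S else P) + (N - 1 - i) * P := by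
  simp only [closedFrom]
  rw [if_neg (by omega : ¬ N ≤ i), if_neg (by omega : ¬ N ≤ min (ta:Int) (tb:Int)),
      max_eq_right hk]
  ring

lemma abs_closed (N R S P : Int) :
    ∀ (d : Nat) (i : Int) (y : Int) (ta tb : Nat), 0 ≤ i → (N - i).toNat = d →
    ((PySem.List.pyRange i N 1).foldl (absStep R S P) (y, ta, tb)).1
      = y + closedFrom N R S P i ta tb := by
  intro d
  induction d with
  | zero =>
      intro i y ta tb hi hd
      have hNi : N ≤ i := by omega
      rw [PySem.List.pyRange_one_eq_nil hNi]
      simp [closedFrom, hNi]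
  | succ d ih =>
      intro i y ta tb hi hd
      have hiN : i < N := by omega
      rw [PySem.List.pyRange_one_cons hiN, List.foldl_cons]
      have hc : ((i.toNat + 1 : Nat) : Int) = i + 1 := by omega
      by_cases hA : i < (ta : Int) <;> by_cases hB : i < (tb : Int)
      · have hstep : absStep R S P (y, ta, tb) i = (y + R, ta, tb) := by
          simp [absStep, hA, hB]
        rw [hstep, ih (i+1) (y+R) ta tb (by omega) (by omega),
            cf_coop N R S P i ta tb hiN hA hB]
        ring
      · -- A cooperates, B defects: add S, A resets to i+1
        have hstep : absStep R S P (y, ta, tb) i = (y + S, i.toNat + 1, tb) := by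
          simp [absStep, hA, hB]
        rw [hstep, ih (i+1) (y+S) (i.toNat+1) tb (by omega) (by omega),
            cf_mismatch N R S P i ta tb hiN (by omega),
            cf_dead N R S P (i+1) (i.toNat+1) tb (by omega) (by omega),
            if_neg hB, if_pos hA]
        by_cases hN1 : N ≤ i + 1
        · rw [if_pos hN1, show N - 1 - i = 0 by omega]; ring
        · rw [if_neg hN1]; ring
      · -- A defects, B cooperates: add T = 0, B resets to i+1
        have hstep : absStep R S P (y, ta, tb) i = (y, ta, i.toNat + 1) := by
          simp [absStep, hA, hB]
        rw [hstep, ih (i+1) y ta (i.toNat+1) (by omega) (by omega),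
            cf_mismatch N R S P i ta tb hiN (by omega),
            cf_dead N R S P (i+1) ta (i.toNat+1) (by omega) (by omega),
            if_pos hB]
        by_cases hN1 : N ≤ i + 1
        · rw [if_pos hN1, show N - 1 - i = 0 by omega]; ring
        · rw [if_neg hN1]; ring
      · -- both defect
        have hstep : absStep R S P (y, ta, tb) i = (y + P, ta, tb) := by
          simp [absStep, hA, hB]
        rw [hstep, ih (i+1) (y+P) ta tb (by omega) (by omega),
            cf_mismatch N R S P i ta tb hiN (by omega),
            if_neg hB, if_neg hA]
        by_cases hN1 : N ≤ i + 1
        · rw [cf_dead N R S P (i+1) ta tb (by omega) (by omega), if_pos hN1,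
              show N - 1 - i = 0 by omega]; ring
        · rw [cf_dead N R S P (i+1) ta tb (by omega) (by omega), if_neg hN1]; ring

lemma final_arith (m n N R S P : Int) :
    closedFrom N R S P 0 m.toNat n.toNat = years_alt m n N R S P := by
  simp only [closedFrom, years_alt]
  by_cases hN : N ≤ 0
  · simp [hN]
  · rw [if_neg (by omega : ¬ N ≤ (0:Int)), if_neg hN]
    have ha : (if m > 0 then min m N else 0) = min ((m.toNat : Int)) N := by
      split_ifs <;> omega
    have hb : (if n > 0 then min n N else 0) = min ((n.toNat : Int)) N := by
      split_ifs <;> omega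
    rw [ha, hb]
    by_cases hk : N ≤ min ((m.toNat : Int)) ((n.toNat : Int))
    · rw [if_pos hk, if_pos (by omega : min (min ((m.toNat:Int)) N) (min ((n.toNat:Int)) N) = N)]
      ring
    · rw [if_neg hk, max_eq_left (by omega : (0:Int) ≤ min ((m.toNat:Int)) ((n.toNat:Int))),
          if_neg (by omega : ¬ min (min ((m.toNat:Int)) N) (min ((n.toNat:Int)) N) = N)]
      by_cases hab : min ((m.toNat:Int)) N = min ((n.toNat:Int)) N
      · rw [if_pos hab, if_neg (by omega : ¬ min ((m.toNat:Int)) ((n.toNat:Int)) < (n.toNat:Int)),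
            if_neg (by omega : ¬ min ((m.toNat:Int)) ((n.toNat:Int)) < (m.toNat:Int)),
            show min (min ((m.toNat:Int)) N) (min ((n.toNat:Int)) N) = min ((m.toNat:Int)) ((n.toNat:Int)) by omega]
        ring
      · rw [if_neg hab,
            show min (min ((m.toNat:Int)) N) (min ((n.toNat:Int)) N) = min ((m.toNat:Int)) ((n.toNat:Int)) by omega]
        by_cases hgt : min ((m.toNat:Int)) N > min ((n.toNat:Int)) N
        · rw [if_pos hgt, if_neg (by omega : ¬ min ((m.toNat:Int)) ((n.toNat:Int)) < (n.toNat:Int)),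
              if_pos (by omega : min ((m.toNat:Int)) ((n.toNat:Int)) < (m.toNat:Int))]
          ring
        · rw [if_neg hgt, if_pos (by omega : min ((m.toNat:Int)) ((n.toNat:Int)) < (n.toNat:Int))]
          ring

lemma years_key (m n N R S P : Int) : ∀ (sa sb : Nat),
    ((PySem.List.pyRange 0 N 1).foldl (yearsStep N R S P)
        (0, List.replicate m.toNat (1:Int) ++ List.replicate sa (0:Int),
            List.replicate n.toNat (1:Int) ++ List.replicate sb (0:Int))).1
      = years_alt m n N R S P := by
  intro sa sb
  rw [bridge N R S P _ (fun i hi => by rw [PySem.List.mem_pyRange_one] at hi; omega) 0 m.toNat n.toNat sa sb,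
      abs_closed N R S P (N - 0).toNat 0 0 m.toNat n.toNat le_rfl rfl,
      final_arith, zero_add]

theorem years_eq (m n N R S P : Int) : years m n N R S P = years_alt m n N R S P := by
  unfold years
  by_cases hm : m = 0 <;> by_cases hn : n = 0
  · have h := years_key m n N R S P N.toNat N.toNat
    simp only [hm, Int.toNat_zero, List.replicate_zero, List.nil_append] at h
    simpa [hm, hn] using h
  · have h := years_key m n N R S P N.toNat (N - n).toNat
    simp only [hm, Int.toNat_zero, List.replicate_zero, List.nil_append] at h
    simpa [hm, hn] using h
  · have h := years_key m n N R S P (N - m).toNat N.toNat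
    simp only [hn, Int.toNat_zero, List.replicate_zero, List.nil_append] at h
    simpa [hm, hn] using h
  · have h := years_key m n N R S P (N - m).toNat (N - n).toNat
    simpa [hm, hn] using h

-- ===== VERDICT (by name: the statement is the Claim_ definition above) =====
theorem years_spec : Claim_equal_years := by
  intro m n N R S P _
  unfold Spec_years
  exact years_eq m n N R S P
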